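-- pv_equiv track=rewrite | github.com/daniel880423/Member_System | file/hw2/1100421/s1100421_2.py | become_even
-- ===== SOURCE A (Python) =====
-- def become_even(lst, index, l, total):
--     if index>=l:    #表示list裡的數都已經是偶數，回傳當前總步數
--         return total
--     tmp = lst[index]    #設當前數為tmp
--     tmp_2=tmp//2        #再設tmp_2為當前數整除2為多少
--     if 2*tmp_2-tmp != 0 :   #不等於0代表非偶數
--         tmp+= 1     #當前數加一變偶數
--         total+= 1   #總步數加一
--         lst[index] = tmp    #將當前數丟到list裡，改變當前數值
--     return become_even(lst, index+1, l, total)  #遞迴並回傳數值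
-- ===== SOURCE B (Python) =====
-- def become_even(lst, index, l, total):
--     # Same behaviour as A (including in-place mutation of lst), written as an
--     # explicit loop instead of tail recursion.
--     for i in range(index, l):
--         if lst[i] % 2 != 0:
--             lst[i] += 1
--             total += 1
--     return total
-- ===== Notes on version B (the rewrite author's own statement) =====
-- stated objective: idiomatic
-- what changed: The tail recursion with an index/divmod oddness test is rewritten as an explicit for-loop over range(index, l) using lst[i] % 2 != 0, accumulating total in place.
-- outside the precondition, e.g. on become_even([1, 2], 0, 5, 0): A raises IndexError, B raises IndexError
import Mathlib
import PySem

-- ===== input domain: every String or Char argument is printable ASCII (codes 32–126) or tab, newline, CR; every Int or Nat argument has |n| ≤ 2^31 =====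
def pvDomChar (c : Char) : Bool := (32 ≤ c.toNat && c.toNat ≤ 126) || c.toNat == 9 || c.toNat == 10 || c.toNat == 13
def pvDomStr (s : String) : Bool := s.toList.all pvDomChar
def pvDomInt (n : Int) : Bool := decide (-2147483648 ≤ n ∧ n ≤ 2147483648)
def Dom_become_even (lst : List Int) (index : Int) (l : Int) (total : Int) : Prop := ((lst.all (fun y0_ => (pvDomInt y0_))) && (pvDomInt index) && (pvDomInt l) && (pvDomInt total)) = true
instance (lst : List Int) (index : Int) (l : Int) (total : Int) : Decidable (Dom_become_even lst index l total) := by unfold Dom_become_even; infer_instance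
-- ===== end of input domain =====

-- B rewrites A's tail recursion as an explicit for-loop over range(index, l) with
-- the idiomatic lst[i] % 2 oddness test (same values, same in-place mutation of lst).

-- ===== PORT A =====
-- literal transliteration of A's tail recursion; pyGetD/pySetD are exact under Pre_ (in-range accesses)
def become_even (lst : List Int) (index : Int) (l : Int) (total : Int) : Int :=
  if _h : index ≥ l then total
  else
    let tmp := PySem.List.pyGetD lst index 0
    let tmp_2 := PySem.Int.floordiv tmp 2
    if 2 * tmp_2 - tmp ≠ 0 then
      become_even (PySem.List.pySetD lst index (tmp + 1)) (index + 1) l (total + 1)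
    else
      become_even lst (index + 1) l total
termination_by (l - index).toNat
decreasing_by all_goals omega

-- ===== PORT B =====
-- one loop iteration of Source B's for-loop body, over the state (lst, total)
def beStep (st : List Int × Int) (i : Int) : List Int × Int :=
  if PySem.Int.mod (PySem.List.pyGetD st.1 i 0) 2 ≠ 0 then
    (PySem.List.pySetD st.1 i (PySem.List.pyGetD st.1 i 0 + 1), st.2 + 1)
  else st

def become_even_alt (lst : List Int) (index : Int) (l : Int) (total : Int) : Int :=
  ((PySem.List.pyRange index l 1).foldl beStep (lst, total)).2

-- ===== PRECONDITION & SPEC =====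
-- Pre_ excludes exactly the inputs where Python A raises (IndexError: some lst[i],
-- index ≤ i < l, out of range, negative indices counting from the end).
def Pre_become_even (lst : List Int) (index : Int) (l : Int) (_total : Int) : Prop :=
  l ≤ index ∨ (-(lst.length : Int) ≤ index ∧ l ≤ (lst.length : Int))
instance (lst : List Int) (index : Int) (l : Int) (total : Int) : Decidable (Pre_become_even lst index l total) := by unfold Pre_become_even; infer_instance

def pvWitness_become_even : List Int × Int × Int × Int := ([1, 2, 3], 0, 3, 0)

def Spec_become_even (lst : List Int) (index : Int) (l : Int) (total : Int) (out : Int) : Prop := out = become_even_alt lst index l total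
instance (lst : List Int) (index : Int) (l : Int) (total : Int) (out : Int) : Decidable (Spec_become_even lst index l total out) := by unfold Spec_become_even; infer_instance

-- ===== CLAIM (what is proved, stated in full; the proofs are below) =====
def Claim_equal_become_even : Prop := ∀ (lst : List Int) (index : Int) (l : Int) (total : Int), Dom_become_even lst index l total → Pre_become_even lst index l total → Spec_become_even lst index l total (become_even lst index l total)

-- ===== LEMMAS AND PROOFS =====

-- A's oddness test 2*(x//2)-x ≠ 0 agrees with B's x % 2 ≠ 0
theorem be_test_eq (x : Int) :
    (2 * PySem.Int.floordiv x 2 - x ≠ 0) ↔ (PySem.Int.mod x 2 ≠ 0) := by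
  have h := PySem.Int.floordiv_mul_add_mod x 2
  constructor <;> intro h1 h2 <;> omega

-- the two ports agree everywhere (even where pyGetD's default fires, both see 0)
theorem be_eq (lst : List Int) (index l total : Int) :
    become_even lst index l total = become_even_alt lst index l total := by
  unfold become_even_alt
  by_cases h : index ≥ l
  · rw [become_even, dif_pos h, PySem.List.pyRange_one_eq_nil h]
    rfl
  · rw [become_even, dif_neg h]
    rw [PySem.List.pyRange_one_cons (by omega), List.foldl_cons]
    show (if 2 * PySem.Int.floordiv (PySem.List.pyGetD lst index 0) 2 - PySem.List.pyGetD lst index 0 ≠ 0 then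
        become_even (PySem.List.pySetD lst index (PySem.List.pyGetD lst index 0 + 1)) (index + 1) l (total + 1)
      else become_even lst (index + 1) l total) =
      (List.foldl beStep (beStep (lst, total) index) (PySem.List.pyRange (index + 1) l 1)).2
    split_ifs with ht
    · rw [be_eq (PySem.List.pySetD lst index (PySem.List.pyGetD lst index 0 + 1))
            (index + 1) l (total + 1)]
      unfold become_even_alt
      simp only [beStep, if_pos ((be_test_eq _).mp ht)]
    · rw [be_eq lst (index + 1) l total]
      unfold become_even_alt
      simp only [beStep]
      rw [if_neg ((not_iff_not.mpr (be_test_eq (PySem.List.pyGetD lst index 0))).mp ht)]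
termination_by (l - index).toNat
decreasing_by all_goals omega

-- ===== VERDICT (by name: the statement is the Claim_ definition above) =====
theorem become_even_spec : Claim_equal_become_even := by
  intro lst index l total _ _
  unfold Spec_become_even
  exact be_eq lst index l total
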